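-- pv_equiv track=rewrite | github.com/illegalbyte/Learning-Python | IPtoBinary.py | Convert_IP
-- ===== SOURCE A (Python) =====
-- binaryPositionValue = [128, 64, 32, 16, 8, 4, 2, 1]
--
-- def Convert_IP(decimal_numbers: str) -> str:
-- 	Binary = ''
-- 	# loops over each '127' and '0' and '1' values in the IP:
-- 	for decimalNumber in decimal_numbers:
-- 		# loops over each
-- 			n = int(decimalNumber)
-- 			binary_value = ''
-- 			for binarypositionvalue in binaryPositionValue:
-- 				if n < binarypositionvalue:
-- 					binary_value += '0'
-- 				else:
-- 					binary_value += '1'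
-- 					n -= binarypositionvalue
--
-- 			Binary += binary_value
-- 	return Binary
-- ===== SOURCE B (Python) =====
-- _DIGIT_BIN = tuple(format(d, '08b') for d in range(10))
--
-- def Convert_IP(decimal_numbers: str) -> str:
-- 	return ''.join(_DIGIT_BIN[int(c)] for c in decimal_numbers)
-- ===== Notes on version B (the rewrite author's own statement) =====
-- stated objective: simpler
-- what changed: Replaces the per-character greedy subtract-by-position-value inner loop with a precomputed 10-entry lookup table of 8-bit strings joined in one pass.
import Mathlib
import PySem

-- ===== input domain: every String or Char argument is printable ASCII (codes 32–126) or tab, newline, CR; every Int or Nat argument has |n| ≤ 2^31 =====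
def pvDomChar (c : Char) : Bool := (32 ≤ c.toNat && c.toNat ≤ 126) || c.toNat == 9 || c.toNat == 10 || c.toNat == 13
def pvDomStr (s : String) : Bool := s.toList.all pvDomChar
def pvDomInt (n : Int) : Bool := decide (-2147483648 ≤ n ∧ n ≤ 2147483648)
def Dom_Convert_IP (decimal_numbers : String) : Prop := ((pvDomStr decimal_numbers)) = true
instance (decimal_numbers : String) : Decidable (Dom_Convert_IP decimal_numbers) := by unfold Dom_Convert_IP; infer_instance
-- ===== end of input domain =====

-- B replaces A's greedy subtract inner loop by a precomputed 10-entry table of 8-bit strings (simpler, one pass).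

-- ===== PORT A =====
def pvBPV : List Int := [128, 64, 32, 16, 8, 4, 2, 1]

def Convert_IP (decimal_numbers : String) : String :=
  String.ofList (decimal_numbers.toList.foldl (fun (acc : List Char) c =>
    let n : Int := (PySem.Int.ofStr? (String.ofList [c])).getD 0
    let st := pvBPV.foldl (fun (st : Int × List Char) v =>
      if st.1 < v then (st.1, st.2 ++ ['0']) else (st.1 - v, st.2 ++ ['1'])) (n, [])
    acc ++ st.2) [])

-- ===== PORT B =====
-- format(d,'08b') ported bit-by-bit (exact for 0 ≤ d < 256)
def pvDigitBin : List String := (List.range 10).map (fun d =>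
  String.ofList ((List.range 8).map (fun i => if d.testBit (7 - i) then '1' else '0')))

def Convert_IP_alt (decimal_numbers : String) : String :=
  String.join (decimal_numbers.toList.map (fun c =>
    (PySem.List.pyGet? pvDigitBin ((PySem.Int.ofStr? (String.ofList [c])).getD 0)).getD ""))

-- ===== PRECONDITION & SPEC =====
-- Pre_ excludes strings containing a non-digit character, on which A's int(c) raises ValueError.
def Pre_Convert_IP (decimal_numbers : String) : Prop :=
  decimal_numbers.toList.all (fun c => c ∈ (['0','1','2','3','4','5','6','7','8','9'] : List Char)) = true
instance (decimal_numbers : String) : Decidable (Pre_Convert_IP decimal_numbers) := by unfold Pre_Convert_IP; infer_instance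
def pvWitness_Convert_IP : String := "127"

def Spec_Convert_IP (decimal_numbers : String) (out : String) : Prop := out = Convert_IP_alt decimal_numbers
instance (decimal_numbers : String) (out : String) : Decidable (Spec_Convert_IP decimal_numbers out) := by unfold Spec_Convert_IP; infer_instance

-- ===== CLAIM (what is proved, stated in full; the proofs are below) =====
def Claim_equal_Convert_IP : Prop := ∀ (decimal_numbers : String), Dom_Convert_IP decimal_numbers → Pre_Convert_IP decimal_numbers → Spec_Convert_IP decimal_numbers (Convert_IP decimal_numbers)

-- ===== LEMMAS AND PROOFS =====

-- per-character value shared by both sides, as a char list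
def pvPerChar (c : Char) : List Char :=
  ((PySem.List.pyGet? pvDigitBin ((PySem.Int.ofStr? (String.ofList [c])).getD 0)).getD "").toList

theorem pvPerChar_A (c : Char)
    (h : c ∈ (['0','1','2','3','4','5','6','7','8','9'] : List Char)) :
    (pvBPV.foldl (fun (st : Int × List Char) v =>
      if st.1 < v then (st.1, st.2 ++ ['0']) else (st.1 - v, st.2 ++ ['1']))
      (((PySem.Int.ofStr? (String.ofList [c])).getD 0), [])).2 = pvPerChar c := by
  fin_cases h <;> decide

theorem pvFoldA (l : List Char) (acc : List Char)
    (h : l.all (fun c => c ∈ (['0','1','2','3','4','5','6','7','8','9'] : List Char)) = true) :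
    l.foldl (fun (acc : List Char) c =>
      let n : Int := (PySem.Int.ofStr? (String.ofList [c])).getD 0
      let st := pvBPV.foldl (fun (st : Int × List Char) v =>
        if st.1 < v then (st.1, st.2 ++ ['0']) else (st.1 - v, st.2 ++ ['1'])) (n, [])
      acc ++ st.2) acc = acc ++ l.flatMap pvPerChar := by
  induction l generalizing acc with
  | nil => simp
  | cons c t ih =>
    simp only [List.all_cons, Bool.and_eq_true] at h
    simp only [List.foldl_cons, List.flatMap_cons]
    rw [ih _ h.2, pvPerChar_A c (of_decide_eq_true h.1), List.append_assoc]

theorem pvFoldAppend (l : List String) (acc : String) :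
    (l.foldl (fun r s => r ++ s) acc).toList = acc.toList ++ l.flatMap String.toList := by
  induction l generalizing acc with
  | nil => simp
  | cons s t ih => simp [ih, List.append_assoc]

theorem pvJoinB (l : List Char) :
    String.join (l.map (fun c =>
      (PySem.List.pyGet? pvDigitBin ((PySem.Int.ofStr? (String.ofList [c])).getD 0)).getD "")) =
    String.ofList (l.flatMap pvPerChar) := by
  apply String.ext
  simp only [String.join, pvFoldAppend, List.flatMap_map]
  induction l <;> simp_all [pvPerChar, String.toList_ofList]

-- ===== VERDICT (by name: the statement is the Claim_ definition above) =====
theorem Convert_IP_spec : Claim_equal_Convert_IP := by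
  intro s _ hpre
  unfold Spec_Convert_IP Convert_IP Convert_IP_alt
  rw [pvFoldA _ _ hpre, pvJoinB]
  rfl
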